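-- pv_equiv track=rewrite | github.com/AI-2024-nhom21/GameMMM | game/learning/Q_learning.py | coorTuplesToId
-- ===== SOURCE A (Python) =====
-- def coorTuplesToId(coorTup1, coorTup2, coorTup3 = None):
--     # row and col is from 0 to 100
--     num1, num2 = coorTup1
--     num3, num4 = coorTup2
--     nums = [num1, num2, num3, num4]
--     if coorTup3:
--         num5, num6 = coorTup3
--         nums.append(num5)
--         nums.append(num6)
--     resultId = 0
--     for num in nums:
--         resultId = resultId * 100 + num
--     return resultId
-- ===== SOURCE B (Python) =====
-- def coorTuplesToId(coorTup1, coorTup2, coorTup3 = None):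
--     # Closed-form positional polynomial instead of the Horner accumulation loop.
--     num1, num2 = coorTup1
--     num3, num4 = coorTup2
--     if coorTup3:
--         num5, num6 = coorTup3
--         return num1*100**5 + num2*100**4 + num3*100**3 + num4*100**2 + num5*100 + num6
--     return num1*100**3 + num2*100**2 + num3*100 + num4
-- ===== Notes on version B (the rewrite author's own statement) =====
-- stated objective: simpler
-- what changed: Replaced the list build plus Horner accumulation loop with a direct closed-form base-100 positional polynomial per branch.
import Mathlib
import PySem

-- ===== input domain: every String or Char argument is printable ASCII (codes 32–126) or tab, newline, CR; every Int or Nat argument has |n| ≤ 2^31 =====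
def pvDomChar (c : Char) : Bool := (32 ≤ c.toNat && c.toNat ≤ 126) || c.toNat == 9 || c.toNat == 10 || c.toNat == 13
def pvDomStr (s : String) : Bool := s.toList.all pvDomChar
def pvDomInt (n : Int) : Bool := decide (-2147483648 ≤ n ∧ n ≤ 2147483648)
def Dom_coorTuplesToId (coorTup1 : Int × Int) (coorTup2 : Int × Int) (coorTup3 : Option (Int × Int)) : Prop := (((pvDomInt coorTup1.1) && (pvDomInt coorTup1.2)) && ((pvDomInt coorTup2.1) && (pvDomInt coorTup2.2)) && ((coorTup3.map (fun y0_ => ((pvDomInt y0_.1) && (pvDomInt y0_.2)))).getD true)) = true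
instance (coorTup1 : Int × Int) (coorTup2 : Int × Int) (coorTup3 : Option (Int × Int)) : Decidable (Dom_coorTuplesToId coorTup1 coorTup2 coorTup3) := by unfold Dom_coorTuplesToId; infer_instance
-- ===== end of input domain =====

-- B replaces A's Horner accumulation loop by a closed-form positional polynomial (objective: simpler).


-- ===== PORT A =====
-- Literal port of A: build nums list (extended when coorTup3 is truthy), then Horner fold.
def coorTuplesToId (coorTup1 : Int × Int) (coorTup2 : Int × Int) (coorTup3 : Option (Int × Int)) : Int :=
  let num1 := coorTup1.1
  let num2 := coorTup1.2
  let num3 := coorTup2.1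
  let num4 := coorTup2.2
  let nums := [num1, num2, num3, num4]
  let nums :=
    match coorTup3 with
    | some t => nums ++ [t.1, t.2]   -- a tuple is always truthy in Python
    | none => nums
  nums.foldl (fun resultId num => resultId * 100 + num) 0

-- ===== PORT B =====
-- Port of B: closed-form base-100 positional polynomial per branch.
def coorTuplesToId_alt (coorTup1 : Int × Int) (coorTup2 : Int × Int) (coorTup3 : Option (Int × Int)) : Int :=
  let num1 := coorTup1.1
  let num2 := coorTup1.2
  let num3 := coorTup2.1
  let num4 := coorTup2.2
  match coorTup3 with
  | some t => num1*100^5 + num2*100^4 + num3*100^3 + num4*100^2 + t.1*100 + t.2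
  | none => num1*100^3 + num2*100^2 + num3*100 + num4

-- ===== PRECONDITION & SPEC =====
def Spec_coorTuplesToId (coorTup1 : Int × Int) (coorTup2 : Int × Int) (coorTup3 : Option (Int × Int)) (out : Int) : Prop := out = coorTuplesToId_alt coorTup1 coorTup2 coorTup3
instance (coorTup1 : Int × Int) (coorTup2 : Int × Int) (coorTup3 : Option (Int × Int)) (out : Int) : Decidable (Spec_coorTuplesToId coorTup1 coorTup2 coorTup3 out) := by unfold Spec_coorTuplesToId; infer_instance

-- ===== CLAIM (what is proved, stated in full; the proofs are below) =====
def Claim_equal_coorTuplesToId : Prop := ∀ (coorTup1 : Int × Int) (coorTup2 : Int × Int) (coorTup3 : Option (Int × Int)), Dom_coorTuplesToId coorTup1 coorTup2 coorTup3 → Spec_coorTuplesToId coorTup1 coorTup2 coorTup3 (coorTuplesToId coorTup1 coorTup2 coorTup3)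

-- ===== LEMMAS AND PROOFS =====

-- ===== VERDICT (by name: the statement is the Claim_ definition above) =====
theorem coorTuplesToId_spec : Claim_equal_coorTuplesToId := by
  intro t1 t2 t3 _
  unfold Spec_coorTuplesToId coorTuplesToId coorTuplesToId_alt
  cases t3 <;> simp [List.foldl] <;> ring
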